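-- pv_equiv track=rewrite | github.com/aaronmichaelfrost/CS_Archive | University/2020-2021/Algorithms/Game.py | game_bottomup
-- ===== SOURCE A (Python) =====
-- def game_bottomup(N):
--
--   game = {}
--   game[1] = False
--   game[2] = True
--
--   for i in range(3, N + 1):
--
--     for k in range(1, int(i/2) + 1):
--
--       j = N-k
--
--       if N % k == 0 and not game_bottomup(j):
--         game[k] = True
--         return True
--       else:
--         game[k] = False
--         return False
--
--
--   return game[N]
-- ===== SOURCE B (Python) =====
-- def game_bottomup(N):
--     # Closed form: positions alternate (game(2)=True, game(k) = not game(k-1) for k>=3),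
--     # so N is a winning position exactly when N is even.  Defined for N >= 1
--     # (A raises KeyError for N <= 0; those inputs are outside Pre_).
--     return N % 2 == 0
-- ===== Notes on version B (the rewrite author's own statement) =====
-- stated objective: simpler
-- what changed: The dict-building recursion (which always returns on the first inner iteration, reducing to game(N) = not game(N-1)) is replaced by the closed-form parity test N % 2 == 0.
import Mathlib
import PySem

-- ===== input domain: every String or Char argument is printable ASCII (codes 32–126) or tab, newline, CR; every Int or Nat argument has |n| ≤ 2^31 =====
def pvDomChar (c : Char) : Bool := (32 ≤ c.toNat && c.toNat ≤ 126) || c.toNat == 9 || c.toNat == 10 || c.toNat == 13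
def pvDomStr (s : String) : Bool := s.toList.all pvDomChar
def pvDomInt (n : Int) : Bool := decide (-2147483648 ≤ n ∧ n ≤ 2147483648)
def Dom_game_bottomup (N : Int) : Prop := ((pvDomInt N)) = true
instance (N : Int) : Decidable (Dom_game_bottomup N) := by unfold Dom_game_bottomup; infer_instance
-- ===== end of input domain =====

-- B replaces A's dict-building recursion by the closed-form parity test N % 2 == 0 (simpler; equal on N >= 1, A raises KeyError for N <= 0).


-- ===== PORT A =====
-- Literal port of A.  game = {1: False, 2: True}; the outer loop 'for i in range(3, N+1)'
-- is entered (i = first element) only when that range is nonempty; its body's inner loop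
-- 'for k in range(1, int(i/2)+1)' always executes its first iteration and RETURNS there
-- (both branches of the if return), so only the heads of the two ranges matter; the
-- final 'return game[N]' raises KeyError unless N ∈ {1,2} (excluded by Pre_; getD false
-- stands in for the raise there).
def game_bottomup (N : Int) : Bool :=
  match h1 : PySem.List.pyRange 3 (N + 1) 1 with
  | [] => ((((PySem.Dict.empty).insert (1 : Int) false).insert 2 true).getD N false)
  | i :: _ =>
    match h2 : PySem.List.pyRange 1 (PySem.Int.truncdiv i 2 + 1) 1 with
    | [] => ((((PySem.Dict.empty).insert (1 : Int) false).insert 2 true).getD N false)   -- unreachable: i ≥ 3, so this range is nonempty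
    | k :: _ =>
      if PySem.Int.mod N k == 0 && !(game_bottomup (N - k)) then true else false
termination_by N.toNat
decreasing_by
  have hi : i ∈ PySem.List.pyRange 3 (N + 1) 1 := by rw [h1]; exact List.mem_cons_self
  have hk : k ∈ PySem.List.pyRange 1 (PySem.Int.truncdiv i 2 + 1) 1 := by
    rw [h2]; exact List.mem_cons_self
  have hi' := (PySem.List.mem_pyRange_one).mp hi
  have hk' := (PySem.List.mem_pyRange_one).mp hk
  omega

-- ===== PORT B =====
def game_bottomup_alt (N : Int) : Bool := PySem.Int.mod N 2 == 0

-- ===== PRECONDITION & SPEC =====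
-- Pre_ excludes exactly N ≤ 0, where A raises KeyError(N) at 'return game[N]'.
def Pre_game_bottomup (N : Int) : Prop := 1 ≤ N
instance (N : Int) : Decidable (Pre_game_bottomup N) := by unfold Pre_game_bottomup; infer_instance
def pvWitness_game_bottomup : Int := 5
def Spec_game_bottomup (N : Int) (out : Bool) : Prop := out = game_bottomup_alt N
instance (N : Int) (out : Bool) : Decidable (Spec_game_bottomup N out) := by unfold Spec_game_bottomup; infer_instance

-- ===== CLAIM (what is proved, stated in full; the proofs are below) =====
def Claim_equal_game_bottomup : Prop := ∀ (N : Int), Dom_game_bottomup N → Pre_game_bottomup N → Spec_game_bottomup N (game_bottomup N)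

-- ===== LEMMAS AND PROOFS =====

-- For N ≥ 3 the port of A reduces to 'not (game_bottomup (N-1))'.
theorem game_bottomup_step (N : Int) (h : 3 ≤ N) :
    game_bottomup N = !(game_bottomup (N - 1)) := by
  rw [game_bottomup.eq_def]
  rw [PySem.List.pyRange_one_cons (by omega : (3:Int) < N + 1)]
  split
  · next heq => exact absurd heq (by simp)
  · next i tail heq =>
    obtain ⟨rfl, -⟩ : 3 = i ∧ _ = tail := by injection heq with a b; exact ⟨a, b⟩
    rw [show PySem.Int.truncdiv 3 2 = 1 from by decide]
    rw [PySem.List.pyRange_one_cons (by omega : (1:Int) < 1 + 1)]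
    split
    · next heq2 => exact absurd heq2 (by simp)
    · next k tail2 heq2 =>
      obtain ⟨rfl, -⟩ : 1 = k ∧ _ = tail2 := by injection heq2 with a b; exact ⟨a, b⟩
      simp

-- main induction on N.toNat
theorem game_bottomup_parity (n : Nat) :
    ∀ N : Int, N.toNat = n → 1 ≤ N → game_bottomup N = game_bottomup_alt N := by
  induction n using Nat.strong_induction_on with
  | _ n ih =>
    intro N hn hN
    by_cases h3 : 3 ≤ N
    · have hrec := ih (N - 1).toNat (by omega) (N - 1) rfl (by omega)
      rw [game_bottomup_step N h3, hrec]
      simp only [game_bottomup_alt]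
      rw [PySem.Int.mod_eq_emod_of_pos (show (0:Int) < 2 by omega), PySem.Int.mod_eq_emod_of_pos (show (0:Int) < 2 by omega)]
      by_cases he : N % 2 = 0
      · have : (N - 1) % 2 = 1 := by omega
        simp [he, this]
      · have : (N - 1) % 2 = 0 := by omega
        have ho : N % 2 = 1 := by omega
        simp [ho, this]
    · have h12 : N = 1 ∨ N = 2 := by omega
      rcases h12 with rfl | rfl <;>
        · rw [game_bottomup.eq_def]
          rw [PySem.List.pyRange_one_eq_nil (by omega)]
          decide

-- ===== VERDICT (by name: the statement is the Claim_ definition above) =====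
theorem game_bottomup_spec : Claim_equal_game_bottomup := by
  intro N _ hPre
  unfold Spec_game_bottomup
  exact game_bottomup_parity N.toNat N rfl hPre
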